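-- pv_equiv track=rewrite | github.com/GotoRyusuke/EDGAR | Counters/russia_counter_lemma.py | find_first_word_index
-- ===== SOURCE A (Python) =====
-- def find_first_word_index(phrases: list, sentence: list):
--     '''
--     A func to find the index of the first word of a phrase in a sentence.
--     This helps to locate the the possible pharses in our dict in a given text.
--
--     Parameters:
--     -----------
--     phrases: list
--         A list of phrases from our dict
--     sentence: list
--         A list of words in a sentence
--
--     Returns:
--     --------
--     first_words_index_dict: dict
--         A dict of first word indices in the following format:
--         {first word in a phrase: [indices of the first word in the sentence]}
--
--     '''
--     first_words_index_dict = {}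
--     for phrase in phrases:
--         first_word_star = phrase[0]
--         if first_word_star not in first_words_index_dict.keys():
--             first_word_index = []
--             if '*' in first_word_star:
--                 first_word = first_word_star.split('*')[0]
--                 for w_i in range(len(sentence)):
--                     w = sentence[w_i]
--                     if w[:len(first_word)] == first_word:
--                         first_word_index.append(w_i)
--             else:
--                 first_word = first_word_star
--                 for w_i in range(len(sentence)):
--                     w = sentence[w_i]
--                     if w == first_word:
--                         first_word_index.append(w_i)
--             first_words_index_dict[first_word_star] = first_word_index
--     return first_words_index_dict
-- ===== SOURCE B (Python) =====
-- def find_first_word_index(phrases: list, sentence: list):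
--     # One pass over the sentence builds word -> indices; non-starred first words are
--     # then resolved by a dict lookup instead of a scan; starred ones use startswith.
--     exact = {}
--     for i, w in enumerate(sentence):
--         exact.setdefault(w, []).append(i)
--     first_words_index_dict = {}
--     for phrase in phrases:
--         first_word_star = phrase[0]
--         if first_word_star in first_words_index_dict:
--             continue
--         if '*' in first_word_star:
--             prefix = first_word_star.split('*')[0]
--             first_words_index_dict[first_word_star] = [
--                 i for i, w in enumerate(sentence) if w.startswith(prefix)]
--         else:
--             first_words_index_dict[first_word_star] = exact.get(first_word_star, [])
--     return first_words_index_dict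
-- ===== Notes on version B (the rewrite author's own statement) =====
-- stated objective: alternative
-- what changed: B builds a word->indices dict from the sentence in one pass and resolves each distinct non-starred first word by a dict lookup instead of A's per-word scan of the sentence; starred first words use one enumerate/startswith comprehension.
import Mathlib
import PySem

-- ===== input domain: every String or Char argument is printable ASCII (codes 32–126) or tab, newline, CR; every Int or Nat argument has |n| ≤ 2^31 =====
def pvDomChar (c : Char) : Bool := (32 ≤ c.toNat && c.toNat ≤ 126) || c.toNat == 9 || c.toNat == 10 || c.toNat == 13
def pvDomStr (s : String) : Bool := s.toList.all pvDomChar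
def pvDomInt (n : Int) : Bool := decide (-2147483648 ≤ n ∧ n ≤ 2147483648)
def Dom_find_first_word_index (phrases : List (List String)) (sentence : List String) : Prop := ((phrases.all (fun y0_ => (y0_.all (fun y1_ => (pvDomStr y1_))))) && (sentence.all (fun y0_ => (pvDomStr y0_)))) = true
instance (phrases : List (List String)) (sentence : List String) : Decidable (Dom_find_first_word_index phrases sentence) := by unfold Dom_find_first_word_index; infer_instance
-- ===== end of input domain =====

-- B replaces A's per-phrase scan of the sentence (for exact first words) by one
-- precomputed word->indices dict built in a single pass; objective: alternative algorithm.

-- ===== PORT A =====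
-- phrase[0]: IndexError on an empty phrase is excluded by Pre_; pyGetD's default is dead there.
def find_first_word_index (phrases : List (List String)) (sentence : List String) : List (String × List Int) :=
  (phrases.foldl (fun d phrase =>
    let first_word_star := PySem.List.pyGetD phrase 0 ""
    if ¬ d.contains first_word_star then
      if PySem.Str.isIn "*" first_word_star then
        let first_word := PySem.List.pyGetD ((PySem.Str.split? first_word_star "*").getD []) 0 ""
        let first_word_index := (PySem.List.pyRange 0 (PySem.List.len sentence) 1).foldl
          (fun acc w_i =>
            let w := PySem.List.pyGetD sentence w_i ""
            if PySem.Str.slice w none (some (PySem.Str.len first_word)) == first_word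
            then acc ++ [w_i] else acc) []
        d.insert first_word_star first_word_index
      else
        let first_word := first_word_star
        let first_word_index := (PySem.List.pyRange 0 (PySem.List.len sentence) 1).foldl
          (fun acc w_i =>
            let w := PySem.List.pyGetD sentence w_i ""
            if w == first_word then acc ++ [w_i] else acc) []
        d.insert first_word_star first_word_index
    else d) PySem.Dict.empty).items

-- ===== PORT B =====
def find_first_word_index_alt (phrases : List (List String)) (sentence : List String) : List (String × List Int) :=
  let exact : PySem.Dict String (List Int) :=
    (PySem.List.enumerate sentence 0).foldl (fun d p => d.modify p.2 [] (· ++ [p.1])) PySem.Dict.empty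
  (phrases.foldl (fun d phrase =>
    let first_word_star := PySem.List.pyGetD phrase 0 ""
    if d.contains first_word_star then d
    else if PySem.Str.isIn "*" first_word_star then
      let prefix_ := PySem.List.pyGetD ((PySem.Str.split? first_word_star "*").getD []) 0 ""
      d.insert first_word_star
        (((PySem.List.enumerate sentence 0).filter (fun p => PySem.Str.startswith p.2 prefix_)).map (·.1))
    else d.insert first_word_star (exact.getD first_word_star [])) PySem.Dict.empty).items

-- ===== PRECONDITION & SPEC =====
-- Pre_ excludes inputs containing an empty phrase: there A (and B) raise IndexError on phrase[0].
def Pre_find_first_word_index (phrases : List (List String)) (sentence : List String) : Prop :=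
  ∀ p ∈ phrases, p ≠ []
instance (phrases : List (List String)) (sentence : List String) : Decidable (Pre_find_first_word_index phrases sentence) := by unfold Pre_find_first_word_index; infer_instance
def pvWitness_find_first_word_index : List (List String) × List String :=
  ([["he*llo", "x"], ["cat"]], ["help", "cat", "he"])
def Spec_find_first_word_index (phrases : List (List String)) (sentence : List String) (out : List (String × List Int)) : Prop := out = find_first_word_index_alt phrases sentence
instance (phrases : List (List String)) (sentence : List String) (out : List (String × List Int)) : Decidable (Spec_find_first_word_index phrases sentence out) := by unfold Spec_find_first_word_index; infer_instance

-- ===== CLAIM (what is proved, stated in full; the proofs are below) =====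
def Claim_equal_find_first_word_index : Prop := ∀ (phrases : List (List String)) (sentence : List String), Dom_find_first_word_index phrases sentence → Pre_find_first_word_index phrases sentence → Spec_find_first_word_index phrases sentence (find_first_word_index phrases sentence)

-- ===== LEMMAS AND PROOFS =====

theorem scan_eq_enumerate_filter (sentence : List String) (q : String → Bool) :
    (PySem.List.pyRange 0 (PySem.List.len sentence) 1).foldl
      (fun acc w_i => if q (PySem.List.pyGetD sentence w_i "") then acc ++ [w_i] else acc) []
    = ((PySem.List.enumerate sentence 0).filter (fun p => q p.2)).map (·.1) := by
  rw [PySem.List.foldl_append_if_eq_filter, PySem.List.enumerate_eq_map_pyRange sentence ""]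
  simp [List.filter_map, List.map_map, Function.comp_def]

theorem exact_getD (sentence : List String) (fw : String) :
    ((PySem.List.enumerate sentence 0).foldl
      (fun d p => d.modify p.2 [] (· ++ [p.1])) PySem.Dict.empty).getD fw []
    = ((PySem.List.enumerate sentence 0).filter (fun p => p.2 == fw)).map (·.1) := by
  rw [show ((PySem.List.enumerate sentence 0).foldl
      (fun d p => d.modify p.2 [] (· ++ [p.1])) PySem.Dict.empty)
    = (((PySem.List.enumerate sentence 0).map Prod.swap).foldl
      (fun d p => d.modify p.1 [] (· ++ [p.2])) PySem.Dict.empty) from by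
    rw [List.foldl_map]; simp]
  rw [PySem.Dict.getD_foldl_modify_append]
  simp [List.filter_map, List.map_map, Function.comp_def]

theorem slice_eq_startswith (w pre : String) :
    (PySem.Str.slice w none (some (PySem.Str.len pre)) == pre) = PySem.Str.startswith w pre := by
  rw [Bool.eq_iff_iff, beq_iff_eq]
  rw [PySem.Str.startswith_eq, PySem.Chars.startswith_iff]
  rw [List.prefix_iff_eq_take]
  constructor
  · intro h
    have := congrArg String.toList h
    simpa [PySem.List.slice_to_natCast] using this.symm
  · intro h
    apply String.toList_inj.mp
    simp only [PySem.Str.toList_slice, PySem.Chars.slice_eq_listSlice, PySem.Str.len_eq,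
      PySem.List.slice_to_natCast]
    simpa using h.symm


theorem star_scan (sentence : List String) (pre : String) :
    (PySem.List.pyRange 0 (PySem.List.len sentence) 1).foldl
      (fun acc w_i =>
        if PySem.Str.slice (PySem.List.pyGetD sentence w_i "") none (some (PySem.Str.len pre)) == pre
        then acc ++ [w_i] else acc) []
    = ((PySem.List.enumerate sentence 0).filter (fun p => PySem.Str.startswith p.2 pre)).map (·.1) := by
  rw [scan_eq_enumerate_filter sentence (fun w => PySem.Str.slice w none (some (PySem.Str.len pre)) == pre)]
  congr 1
  apply List.filter_congr
  intro p _
  exact slice_eq_startswith p.2 pre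

theorem exact_scan (sentence : List String) (fw : String) :
    (PySem.List.pyRange 0 (PySem.List.len sentence) 1).foldl
      (fun acc w_i => if PySem.List.pyGetD sentence w_i "" == fw then acc ++ [w_i] else acc) []
    = ((PySem.List.enumerate sentence 0).foldl
        (fun d p => d.modify p.2 [] (· ++ [p.1])) PySem.Dict.empty).getD fw [] := by
  rw [scan_eq_enumerate_filter sentence (· == fw), exact_getD]

-- ===== VERDICT (by name: the statement is the Claim_ definition above) =====
theorem find_first_word_index_spec : Claim_equal_find_first_word_index := by
  intro phrases sentence _ _
  unfold Spec_find_first_word_index find_first_word_index find_first_word_index_alt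
  refine congrArg PySem.Dict.items ?_
  apply PySem.List.foldl_congr_mem
  intro d phrase _
  dsimp only
  by_cases hc : d.contains (PySem.List.pyGetD phrase 0 "")
  · simp only [hc, not_true, if_false, if_true]
  · simp only [hc, Bool.false_eq_true, not_false_iff, if_true, if_false]
    by_cases hs : PySem.Str.isIn "*" (PySem.List.pyGetD phrase 0 "")
    · simp only [hs, if_true]
      congr 1
      exact star_scan sentence _
    · simp only [hs, Bool.false_eq_true, if_false]
      congr 1
      exact exact_scan sentence _
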